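-- pv_equiv track=rewrite | github.com/jamartinot/rhino8-hotkeys-interactive-html | ngrok/security_attack_simulator.py | build_file_tree_lines
-- ===== SOURCE A (Python) =====
-- from typing import Any, Callable
--
-- def normalize_crawl_path(path: str) -> str:
--     p = (path or "").strip()
--     if not p:
--         return "/"
--     if not p.startswith("/"):
--         p = "/" + p
--     p = p.split("#", 1)[0]
--     return p
--
-- def build_file_tree_lines(files: list[dict[str, Any]], entry_path: str = "/", extra_paths: list[str] | None = None) -> list[str]:
--     paths = sorted({str(item.get("path", "")).strip() for item in files if item.get("path")})
--     if not paths: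
--         if entry_path and entry_path != "/":
--             paths = [entry_path]
--         else:
--             return ["/"]
--     normalized_entry = normalize_crawl_path(entry_path) if entry_path else "/"
--     collapsed_to_root_and_entry = len(paths) <= 2 and all(path in {"/", normalized_entry} for path in paths)
--     if extra_paths and (len(paths) <= 1 or collapsed_to_root_and_entry):
--         paths = sorted(set(paths + [str(path).strip() for path in extra_paths if str(path).strip()]))
--     if paths == ["/"] and entry_path and entry_path != "/":
--         paths = sorted(set(paths + [entry_path]))
--
--     tree: dict[str, Any] = {}
--     for path in paths:
--         cleaned = path.strip("/")
--         if not cleaned: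
--             continue
--         node = tree
--         for part in [chunk for chunk in cleaned.split("/") if chunk]:
--             node = node.setdefault(part, {})
--
--     lines = ["/"]
--
--     def emit(node: dict[str, Any], prefix: str) -> None:
--         keys = sorted(node.keys())
--         for idx, key in enumerate(keys):
--             is_last = idx == len(keys) - 1
--             connector = "└── " if is_last else "├── "
--             lines.append(f"{prefix}{connector}{key}")
--             child_prefix = f"{prefix}{'    ' if is_last else '│   '}"
--             emit(node[key], child_prefix)
--
--     emit(tree, "")
--     return lines
-- ===== SOURCE B (Python) =====
-- def normalize_crawl_path(path: str) -> str:
--     p = (path or "").strip()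
--     if not p:
--         return "/"
--     if not p.startswith("/"):
--         p = "/" + p
--     p = p.split("#", 1)[0]
--     return p
--
-- def build_file_tree_lines(files, entry_path="/", extra_paths=None):
--     paths = sorted({str(item.get("path", "")).strip() for item in files if item.get("path")})
--     if not paths:
--         if entry_path and entry_path != "/":
--             paths = [entry_path]
--         else:
--             return ["/"]
--     normalized_entry = normalize_crawl_path(entry_path) if entry_path else "/"
--     collapsed_to_root_and_entry = len(paths) <= 2 and all(path in {"/", normalized_entry} for path in paths)
--     if extra_paths and (len(paths) <= 1 or collapsed_to_root_and_entry):
--         paths = sorted(set(paths + [str(path).strip() for path in extra_paths if str(path).strip()]))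
--     if paths == ["/"] and entry_path and entry_path != "/":
--         paths = sorted(set(paths + [entry_path]))
--
--     # No trie: render directly from the split paths, bucketing each level once by first component.
--     part_lists = [[chunk for chunk in path.strip("/").split("/") if chunk] for path in paths]
--     part_lists = [pl for pl in part_lists if pl]
--
--     lines = ["/"]
--
--     def render(plist, prefix):
--         buckets = {}
--         for pl in plist:
--             buckets.setdefault(pl[0], []).append(pl[1:])
--         heads = sorted(buckets)
--         for idx, head in enumerate(heads):
--             is_last = idx == len(heads) - 1
--             lines.append(prefix + ("└── " if is_last else "├── ") + head)
--             tails = [t for t in buckets[head] if t]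
--             if tails:
--                 render(tails, prefix + ("    " if is_last else "│   "))
--
--     render(part_lists, "")
--     return lines
-- ===== Notes on version B (the rewrite author's own statement) =====
-- stated objective: alternative
-- what changed: B drops the nested-dict trie entirely: after the same path preprocessing it splits each path into components once and renders recursively, bucketing each level's component lists by first component in one pass and recursing on each bucket's tails.
import Mathlib
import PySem

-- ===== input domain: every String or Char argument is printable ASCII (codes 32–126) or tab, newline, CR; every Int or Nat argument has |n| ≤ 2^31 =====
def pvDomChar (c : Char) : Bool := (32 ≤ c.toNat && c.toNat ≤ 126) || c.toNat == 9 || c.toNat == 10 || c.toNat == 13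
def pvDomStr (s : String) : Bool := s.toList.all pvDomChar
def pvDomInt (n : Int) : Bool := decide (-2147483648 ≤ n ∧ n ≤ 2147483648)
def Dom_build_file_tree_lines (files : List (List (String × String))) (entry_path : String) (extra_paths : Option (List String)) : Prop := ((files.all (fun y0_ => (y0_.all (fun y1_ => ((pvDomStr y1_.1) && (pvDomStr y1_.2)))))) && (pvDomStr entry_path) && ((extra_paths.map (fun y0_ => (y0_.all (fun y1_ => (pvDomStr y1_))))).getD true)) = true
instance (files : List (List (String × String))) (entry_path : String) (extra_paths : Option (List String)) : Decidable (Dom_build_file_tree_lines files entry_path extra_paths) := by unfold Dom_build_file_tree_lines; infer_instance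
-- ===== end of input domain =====

-- B replaces A's nested-dict trie + recursive emit by direct recursive grouping of the
-- split path component lists on their sorted distinct first components (objective: alternative).

-- ===== PORT A =====

-- helper of the module, used by both Pythons verbatim
def normalize_crawl_path (path : String) : String :=
  let p := PySem.Str.strip path          -- (path or "").strip(): identical for strings
  if p = "" then "/"
  else
    let p := if ¬ PySem.Str.startswith p "/" then "/" ++ p else p
    -- p.split("#", 1)[0]; sep "#" ≠ "" and split is never empty, so the defaults are unreachable
    ((PySem.Str.splitMax? p "#" 1).getD []).headD ""

-- A's nested dicts `dict[str, Any]` (values are again such dicts), with insertion order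
mutual
inductive PvTrie where
  | mk : PvKids → PvTrie
inductive PvKids where
  | nil : PvKids
  | cons : String → PvTrie → PvKids → PvKids
end

def pvKidsOf : PvTrie → PvKids
  | .mk k => k

-- `node = tree; for part in parts: node = node.setdefault(part, {})` — functional update of
-- the nested dict chain; a missing key is appended at the end (Python dict insertion order)
mutual
def pvInsert : PvTrie → List String → PvTrie
  | t, [] => t
  | .mk kids, p :: ps => .mk (pvKidsInsert kids p ps)
termination_by t parts => (parts.length, 0, 0)
def pvKidsInsert : PvKids → String → List String → PvKids
  | .nil, p, ps => .cons p (pvInsert (.mk .nil) ps) .nil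
  | .cons k t rest, p, ps =>
      if k = p then .cons k (pvInsert t ps) rest else .cons k t (pvKidsInsert rest p ps)
termination_by kids p ps => (ps.length, 1, sizeOf kids)
end

def pvKidsKeys : PvKids → List String
  | .nil => []
  | .cons k _ rest => k :: pvKidsKeys rest

def pvKidsFind? : PvKids → String → Option PvTrie
  | .nil, _ => none
  | .cons k t rest, h => if k = h then some t else pvKidsFind? rest h

-- termination fact for pvEmit: node[key] is a structurally smaller trie
theorem pvKidsFind?_sizeOf : ∀ (kids : PvKids) (k : String) (c : PvTrie),
    pvKidsFind? kids k = some c → sizeOf c < sizeOf kids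
  | .nil, k, c => by simp [pvKidsFind?]
  | .cons k' t rest, k, c => by
      simp only [pvKidsFind?]
      split
      · intro h; cases h; simp; omega
      · intro h; have := pvKidsFind?_sizeOf rest k c h; simp; omega

theorem pvFind?_sizeOf (t : PvTrie) (k : String) (c : PvTrie)
    (h : pvKidsFind? (pvKidsOf t) k = some c) : sizeOf c < sizeOf t := by
  cases t with
  | mk kids =>
      have := pvKidsFind?_sizeOf kids k c (by simpa [pvKidsOf] using h)
      simp
      omega

-- A's loop body over `paths`
def pvBuildStep (t : PvTrie) (path : String) : PvTrie :=
  let cleaned := PySem.Str.stripChars path "/"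
  if cleaned = "" then t   -- continue
  else pvInsert t (((PySem.Str.split? cleaned "/").getD []).filter (fun c => c ≠ ""))

-- A's recursive emit: sorted keys, connectors, recurse into node[key]
mutual
def pvEmit (t : PvTrie) (pref : String) : List String :=
  let keys := PySem.List.sorted (pvKidsKeys (pvKidsOf t)) (fun x => x) false
  pvEmitKeys t keys 0 keys.length pref
termination_by (sizeOf t, 1, 0)
def pvEmitKeys (t : PvTrie) (keys : List String) (idx n : Nat) (pref : String) : List String :=
  match keys with
  | [] => []
  | key :: rest =>
    let isLast := idx = n - 1
    let line := pref ++ (if isLast then "└── " else "├── ") ++ key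
    let childPref := pref ++ (if isLast then "    " else "│   ")
    let sub := match h : pvKidsFind? (pvKidsOf t) key with
      | none => []     -- unreachable: key comes from node.keys(), so node[key] exists
      | some child => pvEmit child childPref
    line :: sub ++ pvEmitKeys t rest (idx + 1) n pref
termination_by (sizeOf t, 0, keys.length)
decreasing_by
  · exact Prod.Lex.left _ _ (pvFind?_sizeOf _ _ _ h)
  · exact Prod.Lex.right _ (Prod.Lex.right _ (by simp))
end

def build_file_tree_lines (files : List (List (String × String))) (entry_path : String) (extra_paths : Option (List String)) : List String :=
  let paths := PySem.List.sorted (PySem.Set.ofList (files.filterMap (fun item =>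
      match item.lookup "path" with   -- item.get("path"): first match in the association list
      | some s => if s = "" then none else some (PySem.Str.strip s)
      | none => none))) (fun x => x) false
  if paths = [] ∧ (entry_path = "" ∨ entry_path = "/") then ["/"]
  else
    let paths := if paths = [] then [entry_path] else paths
    let normalized_entry := if entry_path ≠ "" then normalize_crawl_path entry_path else "/"
    let paths := if (extra_paths.getD []) ≠ [] ∧
        (paths.length ≤ 1 ∨ (paths.length ≤ 2 ∧ ∀ p ∈ paths, p = "/" ∨ p = normalized_entry)) then
        PySem.List.sorted (PySem.Set.ofList (paths ++ (extra_paths.getD []).filterMap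
          (fun q => let s := PySem.Str.strip q; if s = "" then none else some s))) (fun x => x) false
      else paths
    let paths := if paths = ["/"] ∧ entry_path ≠ "" ∧ entry_path ≠ "/" then
        PySem.List.sorted (PySem.Set.ofList (paths ++ [entry_path])) (fun x => x) false
      else paths
    let tree := paths.foldl pvBuildStep (.mk .nil)
    "/" :: pvEmit tree ""

-- ===== PORT B =====

-- [chunk for chunk in path.strip("/").split("/") if chunk]  (shared by both Pythons verbatim)
def pvParts (path : String) : List String :=
  ((PySem.Str.split? (PySem.Str.stripChars path "/") "/").getD []).filter (fun c => c ≠ "")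

-- buckets = {}; for pl in plist: buckets.setdefault(pl[0], []).append(pl[1:])
-- (pl[0] is ported as headD "": every pl handed to render is nonempty, so pl[0] never raises)
def pvBuckets (L : List (List String)) : PySem.Dict String (List (List String)) :=
  L.foldl (fun d pl =>
    d.insert (pl.headD "") ((d.getD (pl.headD "") []) ++ [PySem.List.slice pl (some 1) none])) ∅

def pvM (L : List (List String)) : Nat := (L.map (fun pl => pl.length + 2)).sum

theorem pvBuckets_concat (L : List (List String)) (pl : List String) :
    pvBuckets (L ++ [pl]) = (pvBuckets L).insert (pl.headD "")
      (((pvBuckets L).getD (pl.headD "") []) ++ [PySem.List.slice pl (some 1) none]) := by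
  simp [pvBuckets, List.foldl_append]

theorem pvSlice_cons' (p : String) (ps : List String) :
    PySem.List.slice (p :: ps) (some 1) none = ps := by
  simp [PySem.List.slice]

theorem pvM_append (A B : List (List String)) : pvM (A ++ B) = pvM A + pvM B := by
  simp [pvM]

-- termination facts for pvRender: a nonempty filtered bucket is strictly smaller than the level
theorem pvM_bucket_le (L : List (List String)) (h : String) :
    pvM (((pvBuckets L).getD h []).filter (fun t => t ≠ [])) +
      (((pvBuckets L).getD h []).filter (fun t => t ≠ [])).length ≤ pvM L := by
  induction L using List.reverseRecOn with
  | nil =>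
      have h0 : (pvBuckets []).getD h [] = [] := rfl
      rw [h0]; simp [pvM]
  | append_singleton L pl ih =>
      rw [pvBuckets_concat, PySem.Dict.getD_insert, pvM_append]
      have hM1 : pvM [pl] = pl.length + 2 := by simp [pvM]
      rw [hM1]
      by_cases hk : h = pl.headD ""
      · rw [if_pos hk, ← hk, List.filter_append]
        by_cases ht : PySem.List.slice pl (some 1) none = []
        · rw [ht]
          have hf : List.filter (fun t => t ≠ []) [([] : List String)] = [] := by simp
          rw [hf, List.append_nil]
          omega
        · have hfil : List.filter (fun t => t ≠ []) [PySem.List.slice pl (some 1) none]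
              = [PySem.List.slice pl (some 1) none] := by simp [ht]
          rw [hfil, pvM_append, List.length_append]
          have hM2 : pvM [PySem.List.slice pl (some 1) none]
              = (PySem.List.slice pl (some 1) none).length + 2 := by simp [pvM]
          have hlt : (PySem.List.slice pl (some 1) none).length + 1 ≤ pl.length := by
            cases pl with
            | nil =>
                exact absurd (by simp [PySem.List.slice]) ht
            | cons a as => rw [pvSlice_cons']; simp
          rw [hM2]
          simp only [List.length_cons, List.length_nil]
          omega
      · rw [if_neg hk]
        omega

theorem pvM_bucket_lt (L : List (List String)) (h : String)
    (hne : ((pvBuckets L).getD h []).filter (fun t => t ≠ []) ≠ []) :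
    pvM (((pvBuckets L).getD h []).filter (fun t => t ≠ [])) < pvM L := by
  have hle := pvM_bucket_le L h
  have : (((pvBuckets L).getD h []).filter (fun t => t ≠ [])).length ≠ 0 := by
    simpa [List.length_eq_zero_iff] using hne
  omega

-- B's recursive bucket-and-render
-- (the loop re-reads the bucket dict of its level; it is the same pure value Source B computes once)
mutual
def pvRender (L : List (List String)) (pref : String) : List String :=
  let buckets := pvBuckets L
  let heads := PySem.List.sorted buckets.keys (fun x => x) false
  pvRenderLoop L heads 0 heads.length pref
termination_by (pvM L, 1, 0)
def pvRenderLoop (L : List (List String)) (heads : List String) (idx n : Nat) (pref : String) : List String :=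
  match heads with
  | [] => []
  | h :: rest =>
    let isLast := idx = n - 1
    let line := pref ++ (if isLast then "└── " else "├── ") ++ h
    let childPref := pref ++ (if isLast then "    " else "│   ")
    let tails := ((pvBuckets L).getD h []).filter (fun t => t ≠ [])
    let sub := if hne : tails = [] then [] else pvRender tails childPref
    line :: sub ++ pvRenderLoop L rest (idx + 1) n pref
termination_by (pvM L, 0, heads.length)
decreasing_by
  · exact Prod.Lex.left _ _ (pvM_bucket_lt L h hne)
  · exact Prod.Lex.right _ (Prod.Lex.right _ (by simp))
end

def build_file_tree_lines_alt (files : List (List (String × String))) (entry_path : String) (extra_paths : Option (List String)) : List String :=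
  let paths := PySem.List.sorted (PySem.Set.ofList (files.filterMap (fun item =>
      match item.lookup "path" with   -- item.get("path"): first match in the association list
      | some s => if s = "" then none else some (PySem.Str.strip s)
      | none => none))) (fun x => x) false
  if paths = [] ∧ (entry_path = "" ∨ entry_path = "/") then ["/"]
  else
    let paths := if paths = [] then [entry_path] else paths
    let normalized_entry := if entry_path ≠ "" then normalize_crawl_path entry_path else "/"
    let paths := if (extra_paths.getD []) ≠ [] ∧
        (paths.length ≤ 1 ∨ (paths.length ≤ 2 ∧ ∀ p ∈ paths, p = "/" ∨ p = normalized_entry)) then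
        PySem.List.sorted (PySem.Set.ofList (paths ++ (extra_paths.getD []).filterMap
          (fun q => let s := PySem.Str.strip q; if s = "" then none else some s))) (fun x => x) false
      else paths
    let paths := if paths = ["/"] ∧ entry_path ≠ "" ∧ entry_path ≠ "/" then
        PySem.List.sorted (PySem.Set.ofList (paths ++ [entry_path])) (fun x => x) false
      else paths
    let part_lists := paths.map pvParts
    let part_lists := part_lists.filter (fun pl => pl ≠ [])
    "/" :: pvRender part_lists ""

-- ===== PRECONDITION & SPEC =====
def Spec_build_file_tree_lines (files : List (List (String × String))) (entry_path : String) (extra_paths : Option (List String)) (out : List String) : Prop := out = build_file_tree_lines_alt files entry_path extra_paths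
instance (files : List (List (String × String))) (entry_path : String) (extra_paths : Option (List String)) (out : List String) : Decidable (Spec_build_file_tree_lines files entry_path extra_paths out) := by unfold Spec_build_file_tree_lines; infer_instance

-- ===== CLAIM (what is proved, stated in full; the proofs are below) =====
def Claim_equal_build_file_tree_lines : Prop := ∀ (files : List (List (String × String))) (entry_path : String) (extra_paths : Option (List String)), Dom_build_file_tree_lines files entry_path extra_paths → Spec_build_file_tree_lines files entry_path extra_paths (build_file_tree_lines files entry_path extra_paths)

-- ===== LEMMAS AND PROOFS =====

def pvBuild (L : List (List String)) : PvTrie := L.foldl pvInsert (.mk .nil)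

-- the ordered groups of a level: tails of the lists starting with h (proof-side view of B's buckets)
def pvTails (L : List (List String)) (h : String) : List (List String) :=
  L.filterMap (fun pl => match pl with
    | p :: rest => if p = h ∧ rest ≠ [] then some rest else none
    | [] => none)

theorem pvTails_cons (pl : List String) (L : List (List String)) (h : String) :
    pvTails (pl :: L) h = (match pl with
      | p :: rest => if p = h ∧ rest ≠ [] then rest :: pvTails L h else pvTails L h
      | [] => pvTails L h) := by
  cases pl with
  | nil => rfl
  | cons p rest =>
      by_cases hc : p = h ∧ rest ≠ []
      · simp [pvTails, hc.1, hc.2]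
      · simp only [pvTails, List.filterMap_cons, if_neg hc]

theorem pvM_tails_le (L : List (List String)) (h : String) :
    pvM (pvTails L h) + L.length ≤ pvM L := by
  induction L with
  | nil => simp [pvTails, pvM]
  | cons pl L ih =>
      rw [pvTails_cons]
      have hM : pvM (pl :: L) = pl.length + 2 + pvM L := by simp only [pvM, List.map_cons, List.sum_cons]
      rw [hM]
      cases pl with
      | nil => simp only [List.length_cons]; omega
      | cons p rest =>
          by_cases hc : p = h ∧ rest ≠ []
          · have hM2 : pvM (rest :: pvTails L h) = rest.length + 2 + pvM (pvTails L h) := by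
              simp only [pvM, List.map_cons, List.sum_cons]
            simp only [if_pos hc, hM2, List.length_cons]
            omega
          · simp only [if_neg hc, List.length_cons]
            omega

theorem pvM_tails_lt (L : List (List String)) (h : String)
    (hne : pvTails L h ≠ []) : pvM (pvTails L h) < pvM L := by
  have hle := pvM_tails_le L h
  have : L ≠ [] := by rintro rfl; simp [pvTails] at hne
  have : 0 < L.length := List.length_pos_iff.mpr this
  omega

theorem pvTails_ne_nil : ∀ (L : List (List String)) (h : String) (pl : List String),
    pl ∈ pvTails L h → pl ≠ []
  | [], h, pl, hm => by simp [pvTails] at hm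
  | q :: L, h, pl, hm => by
      rw [pvTails_cons] at hm
      cases q with
      | nil => exact pvTails_ne_nil L h pl hm
      | cons p rest =>
          dsimp only at hm
          by_cases hc : p = h ∧ rest ≠ []
          · rw [if_pos hc] at hm
            rcases List.mem_cons.mp hm with rfl | hm'
            · exact hc.2
            · exact pvTails_ne_nil L h pl hm'
          · rw [if_neg hc] at hm
            exact pvTails_ne_nil L h pl hm

theorem pvInsert_nil (t : PvTrie) : pvInsert t [] = t := by
  cases t <;> simp [pvInsert]

theorem pvBuildStep_eq (t : PvTrie) (path : String) :
    pvBuildStep t path = pvInsert t (pvParts path) := by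
  unfold pvBuildStep pvParts
  by_cases hcl : PySem.Str.stripChars path "/" = ""
  · simp only [hcl, if_pos]
    rw [show List.filter (fun c => decide (c ≠ "")) ((PySem.Str.split? "" "/").getD [])
        = ([] : List String) from by decide, pvInsert_nil]
  · simp only [if_neg hcl]

theorem pvFind?_insert : ∀ (kids : PvKids) (p : String) (ps : List String) (h : String),
    pvKidsFind? (pvKidsInsert kids p ps) h =
      if h = p then some (pvInsert ((pvKidsFind? kids p).getD (.mk .nil)) ps)
      else pvKidsFind? kids h
  | .nil, p, ps, h => by
      by_cases hp : h = p
      · subst hp; simp [pvKidsInsert, pvKidsFind?]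
      · simp [pvKidsInsert, pvKidsFind?, hp, Ne.symm hp]
  | .cons k t rest, p, ps, h => by
      by_cases hk : k = p
      · subst hk
        by_cases hh : h = k
        · subst hh; simp [pvKidsInsert, pvKidsFind?]
        · simp [pvKidsInsert, pvKidsFind?, hh, Ne.symm hh]
      · have ih := pvFind?_insert rest p ps h
        by_cases hh : k = h
        · subst hh
          simp [pvKidsInsert, pvKidsFind?, hk, Ne.symm hk]
        · simp [pvKidsInsert, pvKidsFind?, hk, hh, ih]

theorem pvKeys_insert : ∀ (kids : PvKids) (p : String) (ps : List String),
    pvKidsKeys (pvKidsInsert kids p ps) = PySem.Set.add (pvKidsKeys kids) p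
  | .nil, p, ps => by
      simp [pvKidsInsert, pvKidsKeys, PySem.Set.add, PySem.Set.contains]
  | .cons k t rest, p, ps => by
      by_cases hk : k = p
      · subst hk
        simp [pvKidsInsert, pvKidsKeys, PySem.Set.add, PySem.Set.contains]
      · have ih := pvKeys_insert rest p ps
        simp only [pvKidsInsert, if_neg hk, pvKidsKeys, ih,
          PySem.Set.add, PySem.Set.contains, List.contains_cons]
        by_cases hm : p ∈ pvKidsKeys rest
        · simp [hm, Ne.symm hk]
        · simp [hm, Ne.symm hk]

theorem pvBuild_concat (L : List (List String)) (pl : List String) :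
    pvBuild (L ++ [pl]) = pvInsert (pvBuild L) pl := by
  simp [pvBuild, List.foldl_append]

theorem pvOfList_concat {α : Type} [BEq α] (xs : List α) (x : α) :
    PySem.Set.ofList (xs ++ [x]) = PySem.Set.add (PySem.Set.ofList xs) x := by
  rw [PySem.Set.ofList_eq_foldl, PySem.Set.ofList_eq_foldl, List.foldl_append]
  rfl

theorem pvKeys_build (L : List (List String)) :
    pvKidsKeys (pvKidsOf (pvBuild L)) = PySem.Set.ofList (L.filterMap List.head?) := by
  induction L using List.reverseRecOn with
  | nil => rfl
  | append_singleton L pl ih =>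
      rw [pvBuild_concat]
      cases pl with
      | nil => simpa [pvInsert_nil] using ih
      | cons p ps =>
          rcases ht : pvBuild L with ⟨kids⟩
          rw [ht] at ih
          simp only [pvKidsOf] at ih
          simp only [pvInsert, pvKidsOf, pvKeys_insert, ih,
            List.filterMap_append, List.filterMap_cons, List.filterMap_nil, List.head?]
          rw [pvOfList_concat]

theorem pvTails_concat (L : List (List String)) (pl : List String) (h : String) :
    pvTails (L ++ [pl]) h = pvTails L h ++ pvTails [pl] h := by
  simp [pvTails, List.filterMap_append]

theorem pvTails_nil_of_not_mem : ∀ (L : List (List String)) (h : String),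
    h ∉ L.filterMap List.head? → pvTails L h = []
  | [], h, _ => rfl
  | pl :: L, h, hm => by
      rw [pvTails_cons]
      cases pl with
      | nil =>
          exact pvTails_nil_of_not_mem L h (by simpa [List.filterMap_cons] using hm)
      | cons p rest =>
          have hph : p ≠ h := by
            intro hcontra; subst hcontra
            simp [List.filterMap_cons] at hm
          have : ¬ (p = h ∧ rest ≠ []) := fun hc => hph hc.1
          dsimp only
          rw [if_neg this]
          refine pvTails_nil_of_not_mem L h (fun hmem => hm ?_)
          have hfc : List.filterMap List.head? ((p :: rest) :: L)
              = p :: List.filterMap List.head? L := by simp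
          rw [hfc]
          exact List.mem_cons_of_mem _ hmem

theorem pvTails_singleton (p : String) (ps : List String) (h : String) :
    pvTails [p :: ps] h = if p = h ∧ ps ≠ [] then [ps] else [] := by
  rw [pvTails_cons]
  dsimp only
  split_ifs with hc <;> rfl

theorem pvBuild_singleton (ps : List String) :
    pvBuild [ps] = pvInsert (.mk .nil) ps := by
  simp [pvBuild]

theorem pvFind?_build (L : List (List String)) (h : String) :
    pvKidsFind? (pvKidsOf (pvBuild L)) h =
      if h ∈ L.filterMap List.head? then some (pvBuild (pvTails L h)) else none := by
  induction L using List.reverseRecOn generalizing h with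
  | nil => simp [pvBuild, pvKidsOf, pvKidsFind?, pvTails]
  | append_singleton L pl ih =>
      rw [pvBuild_concat]
      cases pl with
      | nil =>
          have h1 : (L ++ [([] : List String)]).filterMap List.head? = L.filterMap List.head? := by
            simp [List.filterMap_append]
          have h2 : pvTails (L ++ [([] : List String)]) h = pvTails L h := by
            rw [pvTails_concat]; simp [pvTails]
          rw [pvInsert_nil, h1, h2, ih]
      | cons p ps =>
          rcases ht : pvBuild L with ⟨kids⟩
          have ih' : ∀ h', pvKidsFind? kids h' =
              if h' ∈ L.filterMap List.head? then some (pvBuild (pvTails L h')) else none := by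
            intro h'; have := ih h'; rw [ht] at this; simpa [pvKidsOf] using this
          have hfl : (L ++ [p :: ps]).filterMap List.head? = L.filterMap List.head? ++ [p] := by
            simp [List.filterMap_append, List.filterMap_cons, List.head?]
          have htl : pvTails (L ++ [p :: ps]) h
              = pvTails L h ++ (if p = h ∧ ps ≠ [] then [ps] else []) := by
            rw [pvTails_concat, pvTails_singleton]
          simp only [pvInsert, pvKidsOf, pvFind?_insert, hfl, htl]
          by_cases hp : h = p
          · subst hp
            have hm1 : h ∈ List.filterMap List.head? L ++ [h] := by simp
            rw [if_pos rfl, if_pos hm1, ih' h]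
            by_cases hm : h ∈ L.filterMap List.head?
            · rw [if_pos hm]
              simp only [Option.getD_some]
              by_cases hps : ps = []
              · subst hps
                simp [pvInsert_nil]
              · rw [if_pos (by simp [hps]), pvBuild_concat]
            · rw [if_neg hm]
              rw [pvTails_nil_of_not_mem L h hm]
              simp only [Option.getD_none, List.nil_append]
              by_cases hps : ps = []
              · subst hps
                rw [if_neg (by simp), pvInsert_nil]
                rfl
              · rw [if_pos (by simp [hps]), pvBuild_singleton]
          · rw [if_neg hp]
            have hcond : ¬ (p = h ∧ ps ≠ []) := fun hc => hp hc.1.symm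
            rw [if_neg hcond, List.append_nil, ih' h]
            have : (h ∈ L.filterMap List.head? ++ [p]) ↔ h ∈ L.filterMap List.head? := by
              simp [hp]
            by_cases hm : h ∈ L.filterMap List.head?
            · rw [if_pos hm, if_pos (this.mpr hm)]
            · rw [if_neg hm, if_neg (fun hx => hm (this.mp hx))]

theorem pvEmit_empty (pref : String) : pvEmit (.mk .nil) pref = [] := by
  simp [pvEmit, pvKidsOf, pvKidsKeys, PySem.List.sorted, pvEmitKeys]

theorem pvMap_headD : ∀ (L : List (List String)), (∀ pl ∈ L, pl ≠ []) →
    L.map (fun pl => pl.headD "") = L.filterMap List.head?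
  | [], _ => rfl
  | pl :: L, hne => by
      cases pl with
      | nil => exact absurd rfl (hne [] (by simp))
      | cons p ps =>
          have ih' := pvMap_headD L (fun x hx => hne x (by simp [hx]))
          simp only [List.map_cons, List.filterMap_cons, List.head?_cons, List.headD_cons]
          rw [ih']

theorem pvKeys_buckets (L : List (List String)) (hne : ∀ pl ∈ L, pl ≠ []) :
    (pvBuckets L).keys = PySem.Set.ofList (L.filterMap List.head?) := by
  have h1 := PySem.Dict.keys_foldl_insert_key L (fun pl => pl.headD "")
    (fun d pl => (d.getD (pl.headD "") []) ++ [PySem.List.slice pl (some 1) none])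
    (∅ : PySem.Dict String (List (List String)))
  rw [pvBuckets, h1, pvMap_headD L hne, PySem.Set.ofList_eq_foldl]
  rfl

theorem pvBucketTails : ∀ (L : List (List String)), (∀ pl ∈ L, pl ≠ []) → ∀ (h : String),
    ((pvBuckets L).getD h []).filter (fun t => t ≠ []) = pvTails L h := by
  intro L
  induction L using List.reverseRecOn with
  | nil => intro _ h; rfl
  | append_singleton L pl ih =>
      intro hne h
      have hneL : ∀ x ∈ L, x ≠ [] := fun x hx => hne x (by simp [hx])
      cases pl with
      | nil => exact absurd rfl (hne [] (by simp))
      | cons p ps =>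
          rw [pvBuckets_concat, PySem.Dict.getD_insert]
          have htl : pvTails (L ++ [p :: ps]) h
              = pvTails L h ++ (if p = h ∧ ps ≠ [] then [ps] else []) := by
            rw [pvTails_concat, pvTails_singleton]
          rw [htl]
          have hd : ((p :: ps : List String)).headD "" = p := rfl
          rw [hd]
          by_cases hp : h = p
          · rw [if_pos hp]
            subst hp
            rw [List.filter_append, ih hneL h, pvSlice_cons']
            congr 1
            by_cases hps : ps = [] <;> simp [hps]
          · rw [if_neg hp, if_neg (fun hc => hp hc.1.symm), List.append_nil]
            exact ih hneL h

theorem pvLoop_eq (L : List (List String)) (hne : ∀ pl ∈ L, pl ≠ [])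
    (IH : ∀ L', pvM L' < pvM L → (∀ pl ∈ L', pl ≠ []) → ∀ p,
      pvEmit (pvBuild L') p = pvRender L' p) :
    ∀ (keys : List String) (idx n : Nat) (pref : String),
      (∀ k ∈ keys, k ∈ L.filterMap List.head?) →
      pvEmitKeys (pvBuild L) keys idx n pref = pvRenderLoop L keys idx n pref := by
  intro keys
  induction keys with
  | nil => intro idx n pref _; simp [pvEmitKeys, pvRenderLoop]
  | cons key rest ihk =>
      intro idx n pref hmem
      have hkey : key ∈ L.filterMap List.head? := hmem key (by simp)
      have hfind : pvKidsFind? (pvKidsOf (pvBuild L)) key = some (pvBuild (pvTails L key)) := by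
        rw [pvFind?_build, if_pos hkey]
      have htail := ihk (idx + 1) n pref (fun k hk => hmem k (by simp [hk]))
      have hbt : ((pvBuckets L).getD key []).filter (fun t => t ≠ []) = pvTails L key :=
        pvBucketTails L hne key
      have hsub : ∀ cp : String, pvEmit (pvBuild (pvTails L key)) cp
          = if pvTails L key = [] then [] else pvRender (pvTails L key) cp := by
        intro cp
        by_cases hne' : pvTails L key = []
        · rw [if_pos hne', hne']
          exact pvEmit_empty _
        · rw [if_neg hne']
          exact IH _ (pvM_tails_lt L key hne') (pvTails_ne_nil L key) _
      rw [pvEmitKeys, pvRenderLoop, htail]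
      simp only [hbt]
      split
      · congr 1
        congr 1
        split
        · rename_i heq
          rw [hfind] at heq; simp at heq
        · rename_i child heq
          rw [hfind] at heq
          injection heq with heq'
          subst heq'
          rw [hsub, dite_eq_ite]
      · congr 1
        congr 1
        split
        · rename_i heq
          rw [hfind] at heq; simp at heq
        · rename_i child heq
          rw [hfind] at heq
          injection heq with heq'
          subst heq'
          rw [hsub, dite_eq_ite]

theorem pvBody (L : List (List String)) (hne : ∀ pl ∈ L, pl ≠ []) (pref : String)
    (IH : ∀ L', pvM L' < pvM L → (∀ pl ∈ L', pl ≠ []) → ∀ p,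
      pvEmit (pvBuild L') p = pvRender L' p) :
    pvEmit (pvBuild L) pref = pvRender L pref := by
  rw [pvEmit, pvRender, pvKeys_build, pvKeys_buckets L hne]
  exact pvLoop_eq L hne IH _ 0 _ pref (fun k hk => by
    have h1 : k ∈ (PySem.Set.ofList (L.filterMap List.head?) : List String) :=
      (PySem.List.mem_sorted _ _ _ _).mp hk
    exact (PySem.Set.mem_ofList _ _).mp h1)

theorem pvMain (L : List (List String)) (hne : ∀ pl ∈ L, pl ≠ []) (pref : String) :
    pvEmit (pvBuild L) pref = pvRender L pref := by
  suffices H : ∀ (n : Nat) (L : List (List String)), (∀ pl ∈ L, pl ≠ []) →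
      ∀ (pref : String), pvM L ≤ n → pvEmit (pvBuild L) pref = pvRender L pref from
    H (pvM L) L hne pref (le_refl _)
  intro n
  induction n using Nat.strong_induction_on with
  | _ n ih =>
      intro L hneL pref hle
      exact pvBody L hneL pref (fun L' hlt hne' p => ih (pvM L') (by omega) L' hne' p (le_refl _))

theorem pvFoldl_filter (L : List (List String)) : ∀ (t : PvTrie),
    (L.filter (fun pl => pl ≠ [])).foldl pvInsert t = L.foldl pvInsert t := by
  induction L with
  | nil => intro t; rfl
  | cons pl L ih =>
      intro t
      cases pl with
      | nil =>
          have h1 : List.filter (fun pl => pl ≠ []) (([] : List String) :: L)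
              = List.filter (fun pl => pl ≠ []) L := by simp
          rw [h1, ih t, List.foldl_cons, pvInsert_nil]
      | cons p ps =>
          have h1 : List.filter (fun pl => pl ≠ []) ((p :: ps) :: L)
              = (p :: ps) :: List.filter (fun pl => pl ≠ []) L := by simp
          rw [h1, List.foldl_cons, List.foldl_cons, ih]

theorem pvFoldl_buildStep (paths : List String) :
    paths.foldl pvBuildStep (.mk .nil) = pvBuild (paths.map pvParts) := by
  rw [pvBuild, List.foldl_map]
  induction paths using List.reverseRecOn with
  | nil => rfl
  | append_singleton l a ih => simp [List.foldl_append, ih, pvBuildStep_eq]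

theorem pvFinal (paths : List String) :
    ("/" :: pvEmit (paths.foldl pvBuildStep (.mk .nil)) "" : List String) =
    "/" :: pvRender ((paths.map pvParts).filter (fun pl => pl ≠ [])) "" := by
  rw [pvFoldl_buildStep]
  have hb : pvBuild (paths.map pvParts)
      = pvBuild ((paths.map pvParts).filter (fun pl => pl ≠ [])) :=
    (congrArg _ rfl).trans (pvFoldl_filter (paths.map pvParts) (.mk .nil)).symm
  rw [hb, pvMain _ (fun pl hpl => by simpa using (List.mem_filter.mp hpl).2)]

-- ===== VERDICT (by name: the statement is the Claim_ definition above) =====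
theorem build_file_tree_lines_spec : Claim_equal_build_file_tree_lines := by
  intro files entry_path extra_paths _
  unfold Spec_build_file_tree_lines
  simp only [build_file_tree_lines, build_file_tree_lines_alt]
  split_ifs <;> first | rfl | exact pvFinal _
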